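-- pv_equiv track=rewrite | github.com/A-Korotin/algorithms_and_data_structures | 2 semester/lab4/lab4_3d.py | find_lexicographically_larger_name
-- ===== SOURCE A (Python) =====
-- def find_lexicographically_larger_name(x, y):
--     chars = list(set(x).intersection(set(y)))
--     child_name = ''
--
--     if len(chars) != 0:
--         chars.sort()
--         chars.reverse()
--         while len(chars) != 0:
--             g = min(x.count(chars[0]), y.count(chars[0]))
--             child_name += chars[0] * g
--             for i in range(g):
--                 x = x[x.find(chars[0]) + 1:]
--                 y = y[y.find(chars[0]) + 1:]
--             chars.pop(0)
--     return child_name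
-- ===== SOURCE B (Python) =====
-- def find_lexicographically_larger_name(x, y):
--     # One pass builds occurrence-position lists per character; the main loop
--     # keeps integer cursors into x and y instead of re-slicing the strings.
--     occ_x = {}
--     for i, c in enumerate(x):
--         occ_x.setdefault(c, []).append(i)
--     occ_y = {}
--     for j, c in enumerate(y):
--         occ_y.setdefault(c, []).append(j)
--     i = 0
--     j = 0
--     out = ''
--     for c in sorted(set(occ_x) & set(occ_y), reverse=True):
--         px = occ_x[c]
--         py = occ_y[c]
--         kx = 0
--         while kx < len(px) and px[kx] < i:
--             kx += 1
--         ky = 0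
--         while ky < len(py) and py[ky] < j:
--             ky += 1
--         g = min(len(px) - kx, len(py) - ky)
--         if g:
--             out += c * g
--             i = px[kx + g - 1] + 1
--             j = py[ky + g - 1] + 1
--     return out
-- ===== Notes on version B (the rewrite author's own statement) =====
-- stated objective: faster
-- what changed: A repeatedly counts, finds and re-slices fresh string copies for every consumed character; B builds per-character occurrence-position lists in one pass and then walks two integer cursors into x and y, so no string is ever copied or rescanned.
import Mathlib
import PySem

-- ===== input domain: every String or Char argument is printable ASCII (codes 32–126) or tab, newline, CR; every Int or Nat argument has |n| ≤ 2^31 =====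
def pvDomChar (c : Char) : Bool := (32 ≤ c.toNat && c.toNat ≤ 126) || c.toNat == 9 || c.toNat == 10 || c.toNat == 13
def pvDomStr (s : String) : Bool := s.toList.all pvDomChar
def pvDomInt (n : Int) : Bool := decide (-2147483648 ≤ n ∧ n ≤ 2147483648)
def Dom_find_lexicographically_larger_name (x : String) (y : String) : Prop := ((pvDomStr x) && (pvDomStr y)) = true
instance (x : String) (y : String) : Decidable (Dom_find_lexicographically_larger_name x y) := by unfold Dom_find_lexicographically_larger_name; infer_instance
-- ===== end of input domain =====

-- B replaces A's repeated count/find/slice passes over ever-shorter string copies by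
-- occurrence-position lists built once plus two integer cursors (objective: faster).

-- ===== PORT A =====
-- one body of A's inner 'for i in range(g)' loop: x = x[x.find(c)+1:]; y = y[y.find(c)+1:]
def pvAStep (c : Char) (p : List Char × List Char) : List Char × List Char :=
  (PySem.Chars.slice p.1 (some (PySem.Chars.find p.1 [c] + 1)) none,
   PySem.Chars.slice p.2 (some (PySem.Chars.find p.2 [c] + 1)) none)

-- A's 'while len(chars) != 0' loop; chars.pop(0) = structural recursion on the list
def pvALoop : List Char → List Char → List Char → List Char → List Char
  | [], _, _, acc => acc
  | c :: rest, xs, ys, acc =>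
    let g : Nat := min (PySem.Chars.count xs [c]) (PySem.Chars.count ys [c])
    let acc' := acc ++ PySem.List.pyRepeat [c] (g : Int)
    let p := (List.range g).foldl (fun p _ => pvAStep c p) (xs, ys)
    pvALoop rest p.1 p.2 acc'

def find_lexicographically_larger_name (x : String) (y : String) : String :=
  let chars : PySem.Set Char :=
    PySem.Set.inter (PySem.Set.ofList x.toList) (PySem.Set.ofList y.toList)
  if chars.length ≠ 0 then
    String.ofList (pvALoop ((PySem.List.sorted chars (fun c => c) false).reverse) x.toList y.toList [])
  else String.ofList []

-- ===== PORT B =====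
-- B's 'while kx < len(px) and px[kx] < i: kx += 1'
def pvBScan : List Int → Int → Nat
  | [], _ => 0
  | p :: rest, i => if p < i then pvBScan rest i + 1 else 0

-- B's 'for i, c in enumerate(s): occ.setdefault(c, []).append(i)'
def pvBOcc (s : List Char) : PySem.Dict Char (List Int) :=
  (PySem.List.enumerate s 0).foldl (fun d p => d.modify p.2 [] (fun v => v ++ [p.1])) PySem.Dict.empty

-- B's main 'for c in common' loop over the two cursors i, j
def pvBLoop (occx occy : PySem.Dict Char (List Int)) :
    List Char → Int → Int → List Char → List Char
  | [], _, _, out => out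
  | c :: rest, i, j, out =>
    let px := occx.getD c []
    let py := occy.getD c []
    let kx := pvBScan px i
    let ky := pvBScan py j
    let g : Nat := min (px.length - kx) (py.length - ky)
    if g ≠ 0 then
      pvBLoop occx occy rest
        (PySem.List.pyGetD px ((kx + g - 1 : Nat) : Int) 0 + 1)
        (PySem.List.pyGetD py ((ky + g - 1 : Nat) : Int) 0 + 1)
        (out ++ PySem.List.pyRepeat [c] (g : Int))
    else pvBLoop occx occy rest i j out

def find_lexicographically_larger_name_alt (x : String) (y : String) : String :=
  let occx := pvBOcc x.toList
  let occy := pvBOcc y.toList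
  let common := PySem.List.sorted
    (PySem.Set.inter (PySem.Set.ofList occx.keys) (PySem.Set.ofList occy.keys)) (fun c => c) true
  String.ofList (pvBLoop occx occy common 0 0 [])

-- ===== PRECONDITION & SPEC =====
def Spec_find_lexicographically_larger_name (x : String) (y : String) (out : String) : Prop := out = find_lexicographically_larger_name_alt x y
instance (x : String) (y : String) (out : String) : Decidable (Spec_find_lexicographically_larger_name x y out) := by unfold Spec_find_lexicographically_larger_name; infer_instance

-- ===== CLAIM (what is proved, stated in full; the proofs are below) =====
def Claim_equal_find_lexicographically_larger_name : Prop := ∀ (x : String) (y : String), Dom_find_lexicographically_larger_name x y → Spec_find_lexicographically_larger_name x y (find_lexicographically_larger_name x y)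

-- ===== LEMMAS AND PROOFS =====

-- reference occurrence list: positions of character c in s, in increasing order
def occN : List Char → Char → List Nat
  | [], _ => []
  | a :: t, c => if a = c then 0 :: (occN t c).map (· + 1) else (occN t c).map (· + 1)

-- the A-side single-string step x = x[x.find(c)+1:], as a function to iterate
def pvF (c : Char) (s : List Char) : List Char :=
  PySem.Chars.slice s (some (PySem.Chars.find s [c] + 1)) none

theorem occN_length (s : List Char) (c : Char) : (occN s c).length = s.count c := by
  induction s with
  | nil => simp [occN]
  | cons a t ih => by_cases h : a = c <;> simp [occN, h, ih]

theorem occN_pairwise (s : List Char) (c : Char) : (occN s c).Pairwise (· < ·) := by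
  induction s with
  | nil => simp [occN]
  | cons a t ih =>
    by_cases h : a = c <;> simp [occN, h, List.pairwise_map] <;> exact ih

theorem occN_mem (s : List Char) (c : Char) (p : Nat) : p ∈ occN s c ↔ s[p]? = some c := by
  induction s generalizing p with
  | nil => simp [occN]
  | cons a t ih =>
    cases p with
    | zero => by_cases h : a = c <;> simp [occN, h]
    | succ n => by_cases h : a = c <;> simp [occN, h, ih]

theorem count_go_singleton (c : Char) (l : List Char) (fuel acc : Nat) (h : l.length ≤ fuel) :
    PySem.Chars.count.go [c] fuel l acc = acc + l.count c := by
  induction l generalizing fuel acc with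
  | nil => cases fuel <;> simp [PySem.Chars.count.go]
  | cons a t ih =>
    cases fuel with
    | zero => simp at h
    | succ n =>
      rw [PySem.Chars.count.go]
      by_cases hac : a = c
      · simp [hac, List.isPrefixOf, ih _ _ (by simpa using h)]
        omega
      · have : ¬ ([c].isPrefixOf (a :: t) = true) := by
          simp [List.isPrefixOf]; intro hc; exact absurd hc.symm hac
        simp [this, hac, ih _ _ (by simpa using h)]

theorem chars_count_singleton (s : List Char) (c : Char) :
    PySem.Chars.count s [c] = s.count c := by
  rw [PySem.Chars.count]
  simp [count_go_singleton c s s.length 0 le_rfl]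

theorem find_go_singleton (c : Char) (s : List Char) (k : Nat) :
    PySem.Chars.find.go [c] s k =
      (match occN s c with | [] => (-1 : Int) | p :: _ => (k : Int) + (p : Int)) := by
  induction s generalizing k with
  | nil => simp [PySem.Chars.find.go, occN]
  | cons a t ih =>
    rw [PySem.Chars.find.go.eq_2]
    by_cases hac : a = c
    · simp [hac, List.isPrefixOf, occN]
    · have hpre : ¬ ([c].isPrefixOf (a :: t) = true) := by
        simp [List.isPrefixOf]; intro hc; exact absurd hc.symm hac
      simp only [hpre, if_false, ih, occN, hac, if_false]
      cases occN t c <;> simp <;> push_cast <;> ring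

theorem chars_find_singleton (s : List Char) (c : Char) (p : Nat) (r : List Nat)
    (h : occN s c = p :: r) : PySem.Chars.find s [c] = (p : Int) := by
  rw [PySem.Chars.find, find_go_singleton, h]
  simp

theorem pvBScan_sorted (D : List Nat) (i : Nat) (hD : D.Pairwise (· ≤ ·)) :
    pvBScan (D.map (Nat.cast : Nat → Int)) (i : Int) = D.countP (· < i) := by
  induction D with
  | nil => simp [pvBScan]
  | cons p rest ih =>
    rcases List.pairwise_cons.mp hD with ⟨hall, htail⟩
    rw [List.map_cons]
    show (if (p : Int) < (i : Int) then pvBScan (rest.map (Nat.cast : Nat → Int)) i + 1 else 0) = _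
    rw [List.countP_cons]
    by_cases hpi : p < i
    · rw [if_pos (by exact_mod_cast hpi), ih htail, if_pos (by simpa using hpi)]
    · rw [if_neg (by exact_mod_cast hpi), if_neg (by simpa using hpi)]
      have : rest.countP (· < i) = 0 := by
        rw [List.countP_eq_zero]
        intro q hq
        have := hall q hq
        simp only [decide_eq_true_eq]
        omega
      omega

theorem occN_cons_self (c : Char) (t : List Char) :
    occN (c :: t) c = 0 :: (occN t c).map (· + 1) := by simp [occN]

theorem occN_cons_ne {a c : Char} (t : List Char) (h : a ≠ c) :
    occN (a :: t) c = (occN t c).map (· + 1) := by simp [occN, h]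

theorem countP_shift (E : List Nat) (n : Nat) :
    (E.map (· + 1)).countP (· < n + 1) = E.countP (· < n) := by
  rw [List.countP_map]
  apply List.countP_congr
  intro q _
  simp

theorem occN_drop (s : List Char) (c : Char) (i : Nat) :
    occN (s.drop i) c = ((occN s c).drop ((occN s c).countP (· < i))).map (· - i) ∧
      ∀ p ∈ (occN s c).drop ((occN s c).countP (· < i)), i ≤ p := by
  induction s generalizing i with
  | nil => simp [occN]
  | cons a t ih =>
    cases i with
    | zero => simp
    | succ n =>
      have htail := ih n
      rw [List.drop_succ_cons]
      have key : ∀ (view : List Nat), view = (occN t c).map (· + 1) →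
          occN (t.drop n) c = (view.drop (view.countP (· < n + 1))).map (· - (n + 1)) ∧
            ∀ p ∈ view.drop (view.countP (· < n + 1)), n + 1 ≤ p := by
        intro view hv
        subst hv
        rw [countP_shift, ← List.map_drop, List.map_map]
        refine ⟨?_, ?_⟩
        · rw [htail.1]
          apply List.map_congr_left
          intro q _
          simp
        · intro p hp
          rcases List.mem_map.mp hp with ⟨q, hq, rfl⟩
          have := htail.2 q hq
          omega
      by_cases h : a = c
      · subst h
        rw [occN_cons_self]
        have h0 : List.countP (· < n + 1) (0 :: (occN t a).map (· + 1))
            = ((occN t a).map (· + 1)).countP (· < n + 1) + 1 := by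
          rw [List.countP_cons]
          simp
        rw [h0, List.drop_succ_cons]
        exact key _ rfl
      · rw [occN_cons_ne t h]
        exact key _ rfl

theorem enumerate_cons (a : Char) (t : List Char) (k : Int) :
    PySem.List.enumerate (a :: t) k = (k, a) :: PySem.List.enumerate t (k + 1) := by
  rfl

theorem enumerate_filter_map (s : List Char) (c : Char) (k : Int) :
    ((PySem.List.enumerate s k).filter (fun p => p.2 == c)).map (fun p => p.1) =
      ((occN s c).map (Nat.cast : Nat → Int)).map (· + k) := by
  induction s generalizing k with
  | nil => simp [PySem.List.enumerate, occN]
  | cons a t ih =>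
    rw [enumerate_cons, List.filter_cons]
    by_cases h : a = c
    · subst h
      rw [if_pos (by simp)]
      rw [List.map_cons, ih, occN]
      rw [if_pos rfl]
      simp only [List.map_cons, List.map_map, Nat.cast_zero, zero_add]
      refine congrArg _ ?_
      apply List.map_congr_left
      intro q _
      simp only [Function.comp]
      push_cast
      ring
    · rw [if_neg (by simpa using h), ih, occN, if_neg h]
      simp only [List.map_map]
      apply List.map_congr_left
      intro q _
      simp only [Function.comp]
      push_cast
      ring

theorem enumerate_map_snd (s : List Char) (k : Int) :
    (PySem.List.enumerate s k).map (fun p => p.2) = s := by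
  induction s generalizing k with
  | nil => rfl
  | cons a t ih => rw [enumerate_cons]; simp [ih]

theorem occB_getD (s : List Char) (c : Char) :
    (pvBOcc s).getD c [] = (occN s c).map (Nat.cast : Nat → Int) := by
  have hfold : pvBOcc s =
      (((PySem.List.enumerate s 0).map (fun p => (p.2, p.1))).foldl
        (fun d q => d.modify q.1 [] (fun v => v ++ [q.2])) PySem.Dict.empty) := by
    rw [List.foldl_map]; rfl
  rw [hfold, PySem.Dict.getD_foldl_modify_append]
  simp only [PySem.Dict.getD_empty, List.nil_append, List.filter_map, List.map_map]
  have : ((PySem.List.enumerate s 0).filter ((fun q => q.1 == c) ∘ (fun p => (p.2, p.1)))).map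
      ((fun x => x.2) ∘ (fun p : Int × Char => (p.2, p.1))) =
      ((PySem.List.enumerate s 0).filter (fun p => p.2 == c)).map (fun p => p.1) := by
    rfl
  rw [this, enumerate_filter_map]
  simp

theorem occB_keys (s : List Char) : (pvBOcc s).keys = PySem.Set.ofList s := by
  rw [pvBOcc, PySem.Dict.keys_foldl_modify_key (key := fun p : Int × Char => p.2),
    enumerate_map_snd]
  rw [PySem.Set.update_eq_foldl, PySem.Set.ofList_eq_foldl]
  rfl

theorem countP_succ_head (D : List Nat) (i k p : Nat) (r : List Nat)
    (hD : D.Pairwise (· < ·)) (hk : k = D.countP (· < i))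
    (hd : D.drop k = p :: r) (_hip : i ≤ p) :
    D.countP (· < p + 1) = k + 1 := by
  have hsplit : D = D.take k ++ D.drop k := (List.take_append_drop k D).symm
  have hklen : k ≤ D.length := by
    subst hk; exact List.countP_le_length
  -- every element of take k is < every element of drop k
  have horder : ∀ a ∈ D.take k, ∀ b ∈ D.drop k, a < b := by
    intro a ha b hb
    have := hsplit ▸ hD
    rw [List.pairwise_append] at this
    exact this.2.2 a ha b hb
  have htake : ∀ a ∈ D.take k, a < p + 1 := by
    intro a ha
    have := horder a ha p (by rw [hd]; exact List.mem_cons_self)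
    omega
  have hrest : ∀ b ∈ r, ¬ (b < p + 1) := by
    intro b hb
    have hdp := hsplit ▸ hD
    rw [List.pairwise_append] at hdp
    have : (p :: r).Pairwise (· < ·) := hd ▸ (hD.sublist (List.drop_sublist k D))
    have := (List.pairwise_cons.mp this).1 b hb
    omega
  conv_lhs => rw [hsplit, hd]
  rw [List.countP_append, List.countP_cons]
  have h1 : (D.take k).countP (· < p + 1) = (D.take k).length := by
    rw [List.countP_eq_length]
    intro a ha
    simpa using htake a ha
  have h2 : r.countP (· < p + 1) = 0 := by
    rw [List.countP_eq_zero]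
    intro b hb
    simpa using hrest b hb
  have h3 : (D.take k).length = k := List.length_take_of_le hklen
  rw [h1, h2, h3]
  simp

theorem foldl_range_iterate {α : Type} (f : α → α) (g : Nat) (a : α) :
    (List.range g).foldl (fun p _ => f p) a = f^[g] a := by
  induction g with
  | zero => rfl
  | succ n ih =>
    rw [List.range_succ, List.foldl_append, ih, Function.iterate_succ_apply']
    rfl

theorem iterate_prod {α β : Type} (f : α → α) (h : β → β) (g : Nat) (a : α) (b : β) :
    (fun p : α × β => (f p.1, h p.2))^[g] (a, b) = (f^[g] a, h^[g] b) := by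
  induction g generalizing a b with
  | zero => rfl
  | succ n ih => rw [Function.iterate_succ_apply, Function.iterate_succ_apply,
      Function.iterate_succ_apply]; exact ih (f a) (h b)

theorem pvF_iterate (xs : List Char) (c : Char) (g i : Nat) (hi : i ≤ xs.length)
    (hg : g ≤ (occN xs c).length - (occN xs c).countP (· < i)) :
    (pvF c)^[g] (xs.drop i) =
      xs.drop (if g = 0 then i
        else (occN xs c).getD ((occN xs c).countP (· < i) + g - 1) 0 + 1) := by
  induction g generalizing i with
  | zero => simp
  | succ g ih =>
    set D := occN xs c with hD
    set k := D.countP (· < i) with hk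
    have hlen : 1 ≤ (D.drop k).length := by
      rw [List.length_drop]; omega
    obtain ⟨p, r, hd⟩ : ∃ p r, D.drop k = p :: r := by
      cases hdk : D.drop k with
      | nil => rw [hdk] at hlen; simp at hlen
      | cons p r => exact ⟨p, r, rfl⟩
    have hip : i ≤ p := (occN_drop xs c i).2 p (by rw [← hk, hd]; exact List.mem_cons_self)
    have hpm : p ∈ D := List.mem_of_mem_drop (by rw [hd]; exact List.mem_cons_self)
    have hplen : p < xs.length := by
      have := (occN_mem xs c p).mp hpm
      exact (List.getElem?_eq_some_iff.mp this).1
    have hsuffocc : occN (xs.drop i) c = (p - i) :: r.map (· - i) := by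
      rw [(occN_drop xs c i).1, ← hk, hd, List.map_cons]
    have hstep : pvF c (xs.drop i) = xs.drop (p + 1) := by
      rw [pvF, chars_find_singleton _ _ _ _ hsuffocc]
      rw [PySem.Chars.slice_eq_listSlice]
      have : ((p - i : Nat) : Int) + 1 = ((p - i + 1 : Nat) : Int) := by push_cast; ring
      rw [this, PySem.List.slice_from_natCast, List.drop_drop]
      congr 1
      omega
    rw [Function.iterate_succ_apply, hstep]
    have hkp : D.countP (· < p + 1) = k + 1 :=
      countP_succ_head D i k p r (occN_pairwise xs c) hk hd hip
    have ihres := ih (p + 1) (by omega) (by rw [hkp]; omega)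
    rw [hkp] at ihres
    rw [ihres]
    by_cases hg0 : g = 0
    · subst hg0
      simp only [if_neg (Nat.succ_ne_zero 0)]
      have : D.getD (k + 1 - 1) 0 = p := by
        have h0 : (D.drop k)[0]? = some p := by rw [hd]; rfl
        rw [List.getElem?_drop] at h0
        simp only [Nat.add_zero] at h0
        rw [List.getD_eq_getElem?_getD, Nat.add_sub_cancel, h0]
        rfl
      rw [this]
      simp
    · rw [if_neg hg0, if_neg (Nat.succ_ne_zero g)]
      have heq : k + 1 + g - 1 = k + (g + 1) - 1 := by omega
      rw [heq]

-- count of c in the suffix drop i equals the occurrence count at/after i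
theorem count_drop_eq (xs : List Char) (c : Char) (i : Nat) :
    (xs.drop i).count c = (occN xs c).length - (occN xs c).countP (· < i) := by
  rw [← occN_length, (occN_drop xs c i).1, List.length_map, List.length_drop]

theorem main_loop (xs ys : List Char) (L : List Char) (i j : Nat) (out : List Char)
    (hi : i ≤ xs.length) (hj : j ≤ ys.length) :
    pvALoop L (xs.drop i) (ys.drop j) out =
      pvBLoop (pvBOcc xs) (pvBOcc ys) L (i : Int) (j : Int) out := by
  induction L generalizing i j out with
  | nil => rfl
  | cons c rest ih =>
    set Dx := occN xs c with hDx
    set Dy := occN ys c with hDy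
    set kx := Dx.countP (· < i) with hkx
    set ky := Dy.countP (· < j) with hky
    have hkxlen : kx ≤ Dx.length := List.countP_le_length
    have hkylen : ky ≤ Dy.length := List.countP_le_length
    have hcx : PySem.Chars.count (xs.drop i) [c] = Dx.length - kx := by
      rw [chars_count_singleton, count_drop_eq]
    have hcy : PySem.Chars.count (ys.drop j) [c] = Dy.length - ky := by
      rw [chars_count_singleton, count_drop_eq]
    have hpx : (pvBOcc xs).getD c [] = Dx.map (Nat.cast : Nat → Int) := occB_getD xs c
    have hpy : (pvBOcc ys).getD c [] = Dy.map (Nat.cast : Nat → Int) := occB_getD ys c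
    have hscanx : pvBScan ((pvBOcc xs).getD c []) (i : Int) = kx := by
      rw [hpx, pvBScan_sorted _ _ ((occN_pairwise xs c).imp le_of_lt)]
    have hscany : pvBScan ((pvBOcc ys).getD c []) (j : Int) = ky := by
      rw [hpy, pvBScan_sorted _ _ ((occN_pairwise ys c).imp le_of_lt)]
    have hlx : ((pvBOcc xs).getD c []).length = Dx.length := by rw [hpx, List.length_map]
    have hly : ((pvBOcc ys).getD c []).length = Dy.length := by rw [hpy, List.length_map]
    set g : Nat := min (Dx.length - kx) (Dy.length - ky) with hg
    have hAg : min (PySem.Chars.count (xs.drop i) [c]) (PySem.Chars.count (ys.drop j) [c]) = g := by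
      rw [hcx, hcy]
    have hBg : min (((pvBOcc xs).getD c []).length - kx)
        (((pvBOcc ys).getD c []).length - ky) = g := by
      rw [hpx, hpy, List.length_map, List.length_map]
    have hpair : (List.range g).foldl (fun p _ => pvAStep c p) (xs.drop i, ys.drop j)
        = ((pvF c)^[g] (xs.drop i), (pvF c)^[g] (ys.drop j)) := by
      rw [foldl_range_iterate (pvAStep c) g, show pvAStep c = (fun p : List Char × List Char => (pvF c p.1, pvF c p.2)) from rfl,
        iterate_prod]
    simp only [pvALoop, pvBLoop, hAg, hBg, hscanx, hscany, hpair]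
    by_cases hg0 : g = 0
    · rw [if_neg (by omega)]
      rw [pvF_iterate xs c g i hi (by rw [← hDx, ← hkx]; omega), pvF_iterate ys c g j hj (by rw [← hDy, ← hky]; omega)]
      rw [if_pos hg0, if_pos hg0, hg0]
      have : PySem.List.pyRepeat [c] ((0 : Nat) : Int) = [] := by
        rw [PySem.List.pyRepeat_singleton]; rfl
      rw [this, List.append_nil]
      exact ih i j out hi hj
    · rw [if_pos hg0]
      rw [pvF_iterate xs c g i hi (by rw [← hDx, ← hkx]; omega), pvF_iterate ys c g j hj (by rw [← hDy, ← hky]; omega),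
        if_neg hg0, if_neg hg0]
      have hmx : kx + g - 1 < Dx.length := by omega
      have hmy : ky + g - 1 < Dy.length := by omega
      have hgetx : PySem.List.pyGetD ((pvBOcc xs).getD c []) ((kx + g - 1 : Nat) : Int) 0
          = ((Dx.getD (kx + g - 1) 0 : Nat) : Int) := by
        rw [hpx, PySem.List.pyGetD_natCast]
        rw [List.getD_eq_getElem?_getD, List.getElem?_map, List.getD_eq_getElem?_getD]
        rw [List.getElem?_eq_getElem hmx]
        rfl
      have hgety : PySem.List.pyGetD ((pvBOcc ys).getD c []) ((ky + g - 1 : Nat) : Int) 0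
          = ((Dy.getD (ky + g - 1) 0 : Nat) : Int) := by
        rw [hpy, PySem.List.pyGetD_natCast]
        rw [List.getD_eq_getElem?_getD, List.getElem?_map, List.getD_eq_getElem?_getD]
        rw [List.getElem?_eq_getElem hmy]
        rfl
      rw [hgetx, hgety]
      have hix : Dx.getD (kx + g - 1) 0 + 1 ≤ xs.length := by
        have hmem : Dx.getD (kx + g - 1) 0 ∈ Dx := by
          rw [List.getD_eq_getElem?_getD, List.getElem?_eq_getElem hmx]
          exact List.getElem_mem hmx
        have := (occN_mem xs c _).mp hmem
        have := (List.getElem?_eq_some_iff.mp this).1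
        omega
      have hjy : Dy.getD (ky + g - 1) 0 + 1 ≤ ys.length := by
        have hmem : Dy.getD (ky + g - 1) 0 ∈ Dy := by
          rw [List.getD_eq_getElem?_getD, List.getElem?_eq_getElem hmy]
          exact List.getElem_mem hmy
        have := (occN_mem ys c _).mp hmem
        have := (List.getElem?_eq_some_iff.mp this).1
        omega
      have hfin := ih (Dx.getD (kx + g - 1) 0 + 1) (Dy.getD (ky + g - 1) 0 + 1)
        (out ++ PySem.List.pyRepeat [c] (g : Int)) hix hjy
      rw [← hDx, ← hDy, ← hkx, ← hky]
      rw [hfin]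
      push_cast
      rfl

theorem common_lists (xs ys : List Char) :
    (PySem.List.sorted (PySem.Set.inter (PySem.Set.ofList xs) (PySem.Set.ofList ys))
        (fun c => c) false).reverse =
      PySem.List.sorted (PySem.Set.inter (PySem.Set.ofList (pvBOcc xs).keys)
        (PySem.Set.ofList (pvBOcc ys).keys)) (fun c => c) true := by
  rw [occB_keys, occB_keys, PySem.Set.ofList_ofList, PySem.Set.ofList_ofList]
  set S := PySem.Set.inter (PySem.Set.ofList xs) (PySem.Set.ofList ys) with hS
  have hnd : S.Nodup := PySem.Set.nodup_inter _ _ (PySem.Set.nodup_ofList xs)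
  have hperm : ((PySem.List.sorted S (fun c => c) false).reverse).Perm S :=
    ((PySem.List.sorted S (fun c => c) false).reverse_perm).trans
      (PySem.List.sorted_perm S (fun c => c) false)
  have hlt : (PySem.List.sorted S (fun c => c) false).Pairwise (· < ·) := by
    have hle := PySem.List.sorted_pairwise S (fun c => c)
    have hnd2 : (PySem.List.sorted S (fun c => c) false).Nodup :=
      (PySem.List.sorted_perm S (fun c => c) false).nodup_iff.mpr hnd
    have := hle.and hnd2
    exact this.imp (fun h => lt_of_le_of_ne h.1 h.2)
  have hgt : ((PySem.List.sorted S (fun c => c) false).reverse).Pairwise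
      (fun a b => (fun c : Char => c) b < (fun c : Char => c) a) := by
    rw [List.pairwise_reverse]
    exact hlt
  exact (PySem.List.sorted_rev_eq_of_perm_of_pairwise_gt _ _ _ hperm hgt).symm

-- ===== VERDICT (by name: the statement is the Claim_ definition above) =====
theorem find_lexicographically_larger_name_spec : Claim_equal_find_lexicographically_larger_name := by
  intro x y _
  unfold Spec_find_lexicographically_larger_name
  have hA : find_lexicographically_larger_name x y =
      (if (PySem.Set.inter (PySem.Set.ofList x.toList) (PySem.Set.ofList y.toList)).length ≠ 0 then
        String.ofList (pvALoop ((PySem.List.sorted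
          (PySem.Set.inter (PySem.Set.ofList x.toList) (PySem.Set.ofList y.toList))
          (fun c => c) false).reverse) x.toList y.toList [])
      else String.ofList []) := rfl
  have hB : find_lexicographically_larger_name_alt x y =
      String.ofList (pvBLoop (pvBOcc x.toList) (pvBOcc y.toList)
        (PySem.List.sorted (PySem.Set.inter (PySem.Set.ofList (pvBOcc x.toList).keys)
          (PySem.Set.ofList (pvBOcc y.toList).keys)) (fun c => c) true) 0 0 []) := rfl
  rw [hA, hB, ← common_lists]
  by_cases h : (PySem.Set.inter (PySem.Set.ofList x.toList) (PySem.Set.ofList y.toList)).length ≠ 0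
  · rw [if_pos h]
    have hm := main_loop x.toList y.toList
      ((PySem.List.sorted (PySem.Set.inter (PySem.Set.ofList x.toList) (PySem.Set.ofList y.toList))
        (fun c => c) false).reverse) 0 0 [] (Nat.zero_le _) (Nat.zero_le _)
    simp only [List.drop_zero, Nat.cast_zero] at hm
    exact congrArg String.ofList hm
  · rw [if_neg h]
    have hnil : PySem.Set.inter (PySem.Set.ofList x.toList) (PySem.Set.ofList y.toList) = [] := by
      simpa using h
    rw [hnil]
    rfl
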